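-- pv_equiv track=rewrite | github.com/som1990/ComputerEnhance | HW7/instruction_utils_8086.py | serialize_flags
-- ===== SOURCE A (Python) =====
-- def serialize_flags(flags: int)->str:
--     '''
--     flags
--     bit     Description
--     0      C : Carry Flag
--     1      U : Undefined
--     2      P : Parity Flag
--     3      U : Undefined
--     4      A : Auxiliary Carry Flag
--     5      U : Undefined
--     6      Z : Zero Flag
--     7      S : Sign Flag
--     8      T : Trap Flag
--     9      I : Interupt Flag
--     10      D : Direction Flag
--     11      O : Overflow Flag
--     12-15   U : Undefined
--     '''
--     lables = dict()
--     lables[0] = 'C'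
--     lables[2] = 'P'
--     lables[4] = 'A'
--     lables[6] = 'Z'
--     lables[7] = 'S'
--     lables[8] = 'T'
--     lables[9] = 'I'
--     lables[10] = 'D'
--     lables[11] = 'O'
--     output = ''
--     for flag_pos in lables.keys():
--         flag_val = flags>>flag_pos & 1
--         if flag_val == 1:
--             output += lables[flag_pos]
--
--     return output
-- ===== SOURCE B (Python) =====
-- def serialize_flags(flags: int) -> str:
--     # bit value -> flag letter, for the defined bits of the 8086 flags register
--     NAMES = {1: 'C', 4: 'P', 16: 'A', 64: 'Z', 128: 'S', 256: 'T', 512: 'I', 1024: 'D', 2048: 'O'}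
--     m = flags & 0x0FD5          # keep only the defined flag bits
--     out = []
--     while m:
--         low = m & -m            # extract the lowest set bit
--         out.append(NAMES[low])
--         m ^= low                # clear it
--     return ''.join(out)
-- ===== Notes on version B (the rewrite author's own statement) =====
-- stated objective: alternative
-- what changed: Instead of testing every defined bit position one by one, B masks the flags once to the defined bits and then repeatedly extracts the lowest set bit (m & -m), mapping each bit value to its letter, so it iterates only over the set bits.
import Mathlib
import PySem

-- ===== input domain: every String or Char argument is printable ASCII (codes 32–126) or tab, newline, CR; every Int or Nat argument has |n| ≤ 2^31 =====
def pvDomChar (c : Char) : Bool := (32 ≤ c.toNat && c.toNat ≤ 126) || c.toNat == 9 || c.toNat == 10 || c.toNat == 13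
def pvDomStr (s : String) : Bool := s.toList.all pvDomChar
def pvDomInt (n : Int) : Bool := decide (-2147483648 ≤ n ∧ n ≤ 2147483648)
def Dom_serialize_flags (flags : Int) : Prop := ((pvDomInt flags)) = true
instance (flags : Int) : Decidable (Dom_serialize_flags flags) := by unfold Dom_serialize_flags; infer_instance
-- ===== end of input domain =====

-- B masks the flags once to the defined bits and then repeatedly extracts the lowest set
-- bit (m & -m), mapping each bit VALUE to its letter, instead of testing every bit
-- position; same result, a genuinely different traversal (alternative, not faster).
-- Python '&' '^' '>>' are PySem.Int.band / PySem.Int.bxor / '>>>' (exact, incl. negatives).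

-- ===== PORT A =====
def serialize_flags (flags : Int) : String :=
  let lables : PySem.Dict Int String :=
    ((((((((PySem.Dict.empty.insert (0:Int) "C").insert 2 "P").insert 4 "A").insert 6 "Z").insert 7 "S").insert 8 "T").insert 9 "I").insert 10 "D").insert 11 "O"
  lables.keys.foldl (fun output flag_pos =>
    let flag_val : Int := PySem.Int.band (Int.shiftRight flags flag_pos.toNat) 1
    if flag_val == 1 then output ++ lables.getD flag_pos "" else output) ""

-- ===== PORT B =====
-- Source B's NAMES dict
def pvNames : PySem.Dict Int String :=
  ((((((((PySem.Dict.empty.insert (1:Int) "C").insert 4 "P").insert 16 "A").insert 64 "Z").insert 128 "S").insert 256 "T").insert 512 "I").insert 1024 "D").insert 2048 "O"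

-- Source B's while loop; the fuel is only a totality guard: the masked value has at most 9 set
-- bits and the loop clears one per iteration, so 12 iterations are never exhausted.
-- NAMES[low] cannot miss (low is always a set bit of the mask), so getD is exact here.
def pvLoop (fuel : Nat) (m : Int) (out : List String) : List String :=
  match fuel with
  | 0 => out
  | fuel+1 =>
    if m == 0 then out
    else
      let low := PySem.Int.band m (-m)
      pvLoop fuel (PySem.Int.bxor m low) (out ++ [pvNames.getD low ""])

def serialize_flags_alt (flags : Int) : String :=
  PySem.Str.join "" (pvLoop 12 (PySem.Int.band flags 4053) [])

-- ===== PRECONDITION & SPEC =====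
def Spec_serialize_flags (flags : Int) (out : String) : Prop := out = serialize_flags_alt flags
instance (flags : Int) (out : String) : Decidable (Spec_serialize_flags flags out) := by unfold Spec_serialize_flags; infer_instance

-- ===== CLAIM (what is proved, stated in full; the proofs are below) =====
def Claim_equal_serialize_flags : Prop := ∀ (flags : Int), Dom_serialize_flags flags → Spec_serialize_flags flags (serialize_flags flags)

-- ===== LEMMAS AND PROOFS =====

-- A's per-position test depends only on flags mod 4096
theorem pv_bitlem (flags : Int) (i : Nat) (h : i < 12) :
    PySem.Int.band (Int.shiftRight flags i) 1 = PySem.Int.band (Int.shiftRight (flags % 4096) i) 1 := by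
  rw [show Int.shiftRight flags i = flags >>> i from rfl,
      show Int.shiftRight (flags % 4096) i = (flags % 4096) >>> i from rfl]
  rw [PySem.Int.band_one, PySem.Int.band_one,
      PySem.Int.mod_eq_emod_of_pos (by norm_num), PySem.Int.mod_eq_emod_of_pos (by norm_num),
      Int.shiftRight_eq_div_pow, Int.shiftRight_eq_div_pow]
  have h1 : flags = 4096 * (flags / 4096) + flags % 4096 := by omega
  have h2 : 0 ≤ flags % 4096 := by omega
  have h3 : flags % 4096 < 4096 := by omega
  generalize flags % 4096 = r at *
  generalize flags / 4096 = q at *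
  subst h1
  interval_cases i <;> norm_num <;> omega

-- the masked-off bits of the mask 4053 live below 2^12
theorem pv_landmod (n : Nat) : n &&& 4053 = (n % 4096) &&& 4053 := by
  have h4 : n % 4096 = n % 2^12 := by norm_num
  rw [h4]
  apply Nat.eq_of_testBit_eq
  intro i
  simp only [Nat.testBit_and, Nat.testBit_mod_two_pow]
  by_cases h : i < 12
  · simp [h]
  · have : Nat.testBit 4053 i = false := Nat.testBit_lt_two_pow (by
      calc (4053:Nat) < 2^12 := by norm_num
        _ ≤ 2^i := Nat.pow_le_pow_right (by norm_num) (by omega))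
    simp [this]

set_option maxRecDepth 10000 in
theorem pv_NF : ((List.range 4096).all fun rn => 4053 - ((4095 - rn) &&& 4053) == rn &&& 4053) = true := by decide

-- PySem band at (↑m, -↑m): clear-lowest-bit form
theorem pv_bandneg (m : Nat) : PySem.Int.band (m : Int) (-(m:Int)) = ((m - (m &&& (m-1)) : Nat) : Int) := by
  simp [PySem.Int.band]
  rintro rfl
  simp

-- B's mask depends only on flags mod 4096
theorem pv_bandmod (flags : Int) : PySem.Int.band flags 4053 = PySem.Int.band (flags % 4096) 4053 := by
  by_cases h : 0 ≤ flags
  · rw [PySem.Int.band_of_nonneg h (by norm_num), PySem.Int.band_of_nonneg (by omega) (by norm_num)]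
    have h1 : (flags % 4096).toNat = flags.toNat % 4096 := by omega
    rw [h1]
    exact congrArg _ (pv_landmod _)
  · have hneg : ¬ (0 ≤ flags) := h
    rw [PySem.Int.band_of_nonneg (by omega : (0:Int) ≤ flags % 4096) (by norm_num)]
    simp only [PySem.Int.band, if_neg hneg]
    simp only [show Int.toNat 4053 = 4053 from rfl]
    norm_num
    set rn : Nat := (flags % 4096).toNat with hrn
    have hm : ((-flags).toNat - 1) % 4096 = 4095 - rn := by omega
    have hNF := pv_NF
    rw [List.all_eq_true] at hNF
    have hNF' := hNF rn (List.mem_range.mpr (by omega))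
    simp only [beq_iff_eq] at hNF'
    rw [Nat.land_comm 4053, pv_landmod ((-flags).toNat - 1), hm]
    exact hNF'

-- the positions/letters table of the proof, with B's bit-value dict agreeing on it
def pvTable : List (Nat × String) :=
  [(0,"C"),(2,"P"),(4,"A"),(6,"Z"),(7,"S"),(8,"T"),(9,"I"),(10,"D"),(11,"O")]

def pvVal : List (Nat × String) → List Bool → Nat
  | (p,_) :: ps, b :: bs => (if b then 2^p else 0) + pvVal ps bs
  | _, _ => 0

def pvOut : List (Nat × String) → List Bool → List String
  | (_,s) :: ps, b :: bs => (if b then [s] else []) ++ pvOut ps bs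
  | _, _ => []

def pvSorted : Nat → List (Nat × String) → Prop
  | _, [] => True
  | k, (p,s) :: ps => k ≤ p ∧ pvNames.getD ((2^p : Nat) : Int) "" = s ∧ pvSorted (p+1) ps

theorem pv_val_dvd (ps : List (Nat × String)) (bs : List Bool) (k : Nat)
    (hs : pvSorted k ps) : 2^k ∣ pvVal ps bs := by
  induction ps generalizing bs k with
  | nil => cases bs <;> simp [pvVal]
  | cons q ps ih =>
    obtain ⟨p, s⟩ := q
    cases bs with
    | nil => simp [pvVal]
    | cons b bs =>
      obtain ⟨hk, _, hrest⟩ := hs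
      have h1 : 2^k ∣ pvVal ps bs := dvd_trans (pow_dvd_pow 2 (by omega)) (ih bs (p+1) hrest)
      have h2 : (2:Nat)^k ∣ (if b then 2^p else 0) := by
        cases b <;> simp [pow_dvd_pow 2 hk]
      simpa [pvVal] using Nat.dvd_add h2 h1

theorem pv_L1 (p t : Nat) : (2^(p+1)*t + 2^p) &&& (2^(p+1)*t + 2^p - 1) = 2^(p+1)*t := by
  have hp : (1:Nat) ≤ 2^p := Nat.one_le_two_pow
  have h1 : 2^(p+1)*t + 2^p - 1 = 2^(p+1)*t + (2^p - 1) := by omega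
  rw [h1]
  apply Nat.eq_of_testBit_eq
  intro j
  rw [Nat.testBit_and,
      Nat.testBit_two_pow_mul_add _ (by have := Nat.pow_lt_pow_right (a := 2) (by norm_num) (show p < p+1 by omega); omega),
      Nat.testBit_two_pow_mul_add _ (by have := Nat.pow_lt_pow_right (a := 2) (by norm_num) (show p < p+1 by omega); omega)]
  by_cases hj : j < p + 1
  · simp only [if_pos hj, Nat.testBit_two_pow, Nat.testBit_two_pow_sub_one, Nat.testBit_two_pow_mul]
    rcases eq_or_ne p j with he | he
    · simp [he]
    · simp [he]
      omega
  · simp only [if_neg hj, Nat.testBit_two_pow_mul, Bool.and_self]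
    simp [show j ≥ p+1 by omega]

theorem pv_L2 (p t : Nat) : (2^(p+1)*t + 2^p) ^^^ 2^p = 2^(p+1)*t := by
  apply Nat.eq_of_testBit_eq
  intro j
  rw [Nat.testBit_xor,
      Nat.testBit_two_pow_mul_add _ (by have := Nat.pow_lt_pow_right (a := 2) (by norm_num) (show p < p+1 by omega); omega)]
  by_cases hj : j < p + 1
  · simp only [if_pos hj, Nat.testBit_two_pow, Nat.testBit_two_pow_mul]
    rcases eq_or_ne p j with he | he
    · simp [he]
    · simp [he]
      omega
  · simp only [if_neg hj, Nat.testBit_two_pow, Nat.testBit_two_pow_mul]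
    simp [show j ≥ p+1 by omega, show ¬ (p = j) by omega]

theorem pv_loopGen (ps : List (Nat × String)) (bs : List Bool) (out : List String)
    (fuel k : Nat) (hs : pvSorted k ps) (hlen : bs.length = ps.length)
    (hfuel : ps.length ≤ fuel) :
    pvLoop fuel ((pvVal ps bs : Nat) : Int) out = out ++ pvOut ps bs := by
  induction ps generalizing bs out fuel k with
  | nil =>
    cases bs with
    | nil => cases fuel <;> simp [pvVal, pvOut, pvLoop]
    | cons b bs => simp at hlen
  | cons q ps ih =>
    obtain ⟨p, s⟩ := q
    cases bs with
    | nil => simp at hlen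
    | cons b bs =>
      obtain ⟨hk, hkey, hrest⟩ := hs
      simp only [List.length_cons] at hlen hfuel
      cases b with
      | false =>
        simpa [pvVal, pvOut] using ih bs out fuel (p+1) hrest (by omega) (by omega)
      | true =>
        obtain ⟨t, ht⟩ := pv_val_dvd ps bs (p+1) hrest
        cases fuel with
        | zero => omega
        | succ f =>
          have hm : pvVal ((p,s) :: ps) (true :: bs) = 2^(p+1)*t + 2^p := by
            simp [pvVal, ht]; omega
          have hm0 : ¬ ((((pvVal ((p,s) :: ps) (true :: bs) : Nat) : Int)) == 0) = true := by
            simp only [beq_iff_eq, Int.natCast_eq_zero, hm]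
            positivity
          rw [pvLoop, if_neg hm0]
          have hlow : PySem.Int.band ((pvVal ((p,s) :: ps) (true :: bs) : Nat) : Int)
              (-((pvVal ((p,s) :: ps) (true :: bs) : Nat) : Int)) = ((2^p : Nat) : Int) := by
            rw [pv_bandneg, hm]
            congr 1
            rw [pv_L1]
            exact Nat.add_sub_cancel_left _ _
          have hxor : PySem.Int.bxor ((pvVal ((p,s) :: ps) (true :: bs) : Nat) : Int) ((2^p : Nat) : Int)
              = ((pvVal ps bs : Nat) : Int) := by
            rw [PySem.Int.bxor_natCast, hm, pv_L2, ht]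
          simp only [hlow, hxor, hkey]
          rw [ih bs (out ++ [s]) f (p+1) hrest (by omega) (by omega)]
          simp [pvOut]

set_option maxRecDepth 10000 in
theorem pv_DEC : ((List.range 4096).all fun n => n &&& 4053 ==
    pvVal pvTable [n.testBit 0, n.testBit 2, n.testBit 4, n.testBit 6, n.testBit 7,
                   n.testBit 8, n.testBit 9, n.testBit 10, n.testBit 11]) = true := by decide

-- A's Boolean test at position p equals testBit
theorem pv_tb (n p : Nat) : (PySem.Int.band (Int.shiftRight (n : Int) p) 1 == 1) = n.testBit p := by
  rw [show Int.shiftRight (n:Int) p = (n:Int) >>> p from rfl]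
  rw [← Int.natCast_shiftRight, show (1:Int) = ((1:Nat):Int) from rfl, PySem.Int.band_natCast]
  simp only [Nat.testBit_eq_decide_div_mod_eq, Nat.and_one_is_mod, Nat.shiftRight_eq_div_pow]
  rcases Nat.mod_two_eq_zero_or_one (n / 2^p) with h | h <;> simp [h]

theorem pv_sorted : pvSorted 0 pvTable :=
  ⟨by norm_num, by rfl, by norm_num, by rfl, by norm_num, by rfl, by norm_num, by rfl,
   by norm_num, by rfl, by norm_num, by rfl, by norm_num, by rfl, by norm_num, by rfl,
   by norm_num, by rfl, trivial⟩

theorem pv_main (flags : Int) : serialize_flags flags = serialize_flags_alt flags := by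
  set n : Nat := (flags % 4096).toNat with hn
  have hr : flags % 4096 = (n : Int) := by omega
  -- B's side: mask, bit-sum decomposition, and the loop characterisation
  have hD := pv_DEC
  rw [List.all_eq_true] at hD
  have hD' := hD n (List.mem_range.mpr (by omega))
  simp only [beq_iff_eq] at hD'
  have hB : serialize_flags_alt flags = PySem.Str.join ""
      (pvOut pvTable [n.testBit 0, n.testBit 2, n.testBit 4, n.testBit 6, n.testBit 7,
                      n.testBit 8, n.testBit 9, n.testBit 10, n.testBit 11]) := by
    unfold serialize_flags_alt
    rw [pv_bandmod, hr, show (4053:Int) = ((4053:Nat):Int) from rfl, PySem.Int.band_natCast,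
        hD', pv_loopGen pvTable _ [] 12 0 pv_sorted rfl (by simp [pvTable])]
    rfl
  rw [hB]
  -- A's side: unfold the fold over the nine keys and turn each test into a testBit of n
  have hA : serialize_flags flags = List.foldl (fun output flag_pos =>
      if PySem.Int.band (Int.shiftRight flags flag_pos.toNat) 1 == 1 then
        output ++ (((((((((PySem.Dict.empty.insert (0:Int) "C").insert 2 "P").insert 4 "A").insert 6 "Z").insert 7 "S").insert 8 "T").insert 9 "I").insert 10 "D").insert 11 "O").getD flag_pos ""
      else output) ""
      (((((((((PySem.Dict.empty.insert (0:Int) "C").insert 2 "P").insert 4 "A").insert 6 "Z").insert 7 "S").insert 8 "T").insert 9 "I").insert 10 "D").insert 11 "O").keys := rfl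
  rw [hA, show (((((((((PySem.Dict.empty.insert (0:Int) "C").insert 2 "P").insert 4 "A").insert 6 "Z").insert 7 "S").insert 8 "T").insert 9 "I").insert 10 "D").insert 11 "O").keys = [0,2,4,6,7,8,9,10,11] from rfl]
  simp only [List.foldl_cons, List.foldl_nil]
  simp only [show (0:Int).toNat = (0:Nat) from rfl, show (2:Int).toNat = (2:Nat) from rfl,
    show (4:Int).toNat = (4:Nat) from rfl, show (6:Int).toNat = (6:Nat) from rfl,
    show (7:Int).toNat = (7:Nat) from rfl, show (8:Int).toNat = (8:Nat) from rfl,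
    show (9:Int).toNat = (9:Nat) from rfl, show (10:Int).toNat = (10:Nat) from rfl,
    show (11:Int).toNat = (11:Nat) from rfl]
  rw [pv_bitlem flags 0 (by norm_num), pv_bitlem flags 2 (by norm_num),
      pv_bitlem flags 4 (by norm_num), pv_bitlem flags 6 (by norm_num),
      pv_bitlem flags 7 (by norm_num), pv_bitlem flags 8 (by norm_num),
      pv_bitlem flags 9 (by norm_num), pv_bitlem flags 10 (by norm_num),
      pv_bitlem flags 11 (by norm_num), hr]
  simp only [pv_tb]
  simp only [
    show ((((((((((PySem.Dict.empty.insert (0:Int) "C").insert 2 "P").insert 4 "A").insert 6 "Z").insert 7 "S").insert 8 "T").insert 9 "I").insert 10 "D").insert 11 "O").getD 0 "") = "C" from rfl,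
    show ((((((((((PySem.Dict.empty.insert (0:Int) "C").insert 2 "P").insert 4 "A").insert 6 "Z").insert 7 "S").insert 8 "T").insert 9 "I").insert 10 "D").insert 11 "O").getD 2 "") = "P" from rfl,
    show ((((((((((PySem.Dict.empty.insert (0:Int) "C").insert 2 "P").insert 4 "A").insert 6 "Z").insert 7 "S").insert 8 "T").insert 9 "I").insert 10 "D").insert 11 "O").getD 4 "") = "A" from rfl,
    show ((((((((((PySem.Dict.empty.insert (0:Int) "C").insert 2 "P").insert 4 "A").insert 6 "Z").insert 7 "S").insert 8 "T").insert 9 "I").insert 10 "D").insert 11 "O").getD 6 "") = "Z" from rfl,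
    show ((((((((((PySem.Dict.empty.insert (0:Int) "C").insert 2 "P").insert 4 "A").insert 6 "Z").insert 7 "S").insert 8 "T").insert 9 "I").insert 10 "D").insert 11 "O").getD 7 "") = "S" from rfl,
    show ((((((((((PySem.Dict.empty.insert (0:Int) "C").insert 2 "P").insert 4 "A").insert 6 "Z").insert 7 "S").insert 8 "T").insert 9 "I").insert 10 "D").insert 11 "O").getD 8 "") = "T" from rfl,
    show ((((((((((PySem.Dict.empty.insert (0:Int) "C").insert 2 "P").insert 4 "A").insert 6 "Z").insert 7 "S").insert 8 "T").insert 9 "I").insert 10 "D").insert 11 "O").getD 9 "") = "I" from rfl,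
    show ((((((((((PySem.Dict.empty.insert (0:Int) "C").insert 2 "P").insert 4 "A").insert 6 "Z").insert 7 "S").insert 8 "T").insert 9 "I").insert 10 "D").insert 11 "O").getD 10 "") = "D" from rfl,
    show ((((((((((PySem.Dict.empty.insert (0:Int) "C").insert 2 "P").insert 4 "A").insert 6 "Z").insert 7 "S").insert 8 "T").insert 9 "I").insert 10 "D").insert 11 "O").getD 11 "") = "O" from rfl]
  generalize n.testBit 0 = t0
  generalize n.testBit 2 = t2
  generalize n.testBit 4 = t4
  generalize n.testBit 6 = t6
  generalize n.testBit 7 = t7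
  generalize n.testBit 8 = t8
  generalize n.testBit 9 = t9'
  generalize n.testBit 10 = t10
  generalize n.testBit 11 = t11
  revert t0 t2 t4 t6 t7 t8 t9' t10 t11
  decide

-- ===== VERDICT (by name: the statement is the Claim_ definition above) =====
theorem serialize_flags_spec : Claim_equal_serialize_flags := by
  intro flags _
  unfold Spec_serialize_flags
  exact pv_main flags
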